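-- pv_equiv track=rewrite | github.com/pc5401/my_BOJ | 백준/Silver/7378. Watchdog/Watchdog.py | solve
-- ===== SOURCE A (Python) =====
-- def solve(S, H, hatches):
--     hatch_set = set(hatches)
--     for x in range(S + 1):
--         for y in range(S + 1):
--             if (x, y) in hatch_set:
--                 continue
--             r = min(x, y, S - x, S - y)
--             r2 = r * r
--             ok = True
--             for hx, hy in hatches:
--                 dx = x - hx
--                 dy = y - hy
--                 d2 = dx * dx + dy * dy
--                 if d2 > r2:
--                     ok = False
--                     break
--             if ok:
--                 return x, y
--     return None
-- ===== SOURCE B (Python) =====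
-- def solve(S, H, hatches):
--     # Convex-hull-trick re-implementation: for fixed x the farthest-hatch test
--     # is "y*y + max over lines(m=-2*hy, b=hy^2+(x-hx)^2) <= r^2"; per row we keep
--     # only the upper envelope of those lines (one line per distinct hy, using the
--     # extreme hx of the group), so each grid point queries the small hull instead
--     # of scanning every hatch.
--     if S < 0:
--         return None
--     if not hatches:
--         return (0, 0)
--     hatch_set = set(hatches)
--     ys_desc = sorted({hy for _, hy in hatches}, reverse=True)
--     groups = [(hy,
--                min(hx for hx, h2 in hatches if h2 == hy),
--                max(hx for hx, h2 in hatches if h2 == hy))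
--               for hy in ys_desc]
--     for x in range(S + 1):
--         # lines arrive in strictly increasing slope order (m = -2*hy)
--         hull = []
--         for hy, lo, hi in groups:
--             m = -2 * hy
--             b = hy * hy + max((x - lo) * (x - lo), (x - hi) * (x - hi))
--             while len(hull) >= 2:
--                 m1, b1 = hull[-2]
--                 m2, b2 = hull[-1]
--                 if (b1 - b2) * (m - m2) >= (b2 - b) * (m2 - m1):
--                     hull.pop()
--                 else:
--                     break
--             hull.append((m, b))
--         for y in range(S + 1):
--             if (x, y) in hatch_set:
--                 continue
--             r = min(x, y, S - x, S - y)
--             if y * y + max(m * y + b for m, b in hull) <= r * r: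
--                 return (x, y)
--     return None
-- ===== Notes on version B (the rewrite author's own statement) =====
-- stated objective: alternative
-- what changed: B rewrites the farthest-hatch test via the lifting d2 = y^2 + (-2*hy*y + hy^2 + (x-hx)^2): per row x it builds the upper envelope (convex hull trick) of one line per distinct hy (with the extreme hx of that group) and each grid point queries the envelope, instead of A's per-point scan over all hatches with an early break.
import Mathlib
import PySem

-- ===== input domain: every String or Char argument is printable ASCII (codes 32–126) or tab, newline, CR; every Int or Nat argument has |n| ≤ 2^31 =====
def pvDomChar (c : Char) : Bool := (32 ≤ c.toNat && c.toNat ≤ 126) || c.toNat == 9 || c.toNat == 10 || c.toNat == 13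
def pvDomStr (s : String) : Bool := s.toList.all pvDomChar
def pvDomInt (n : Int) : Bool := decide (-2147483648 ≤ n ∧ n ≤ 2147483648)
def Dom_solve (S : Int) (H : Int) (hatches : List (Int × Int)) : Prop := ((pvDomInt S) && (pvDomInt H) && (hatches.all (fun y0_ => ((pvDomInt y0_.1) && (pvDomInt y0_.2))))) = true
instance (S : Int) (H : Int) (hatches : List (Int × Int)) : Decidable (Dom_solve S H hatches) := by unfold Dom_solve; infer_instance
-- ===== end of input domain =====

-- B replaces A's per-point scan over all hatches by a per-row upper envelope of lines
-- (convex hull trick on d2 = y^2 + (-2*hy*y + hy^2 + (x-hx)^2)); objective: alternative.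

-- ===== PORT A =====
-- inner 'for hx, hy in hatches' loop with the ok-flag and break
def innerA (x y r2 : Int) : List (Int × Int) → Bool
  | [] => true
  | h :: t =>
    if (x - h.1) * (x - h.1) + (y - h.2) * (y - h.2) > r2 then false
    else innerA x y r2 t

def yLoopA (S x : Int) (hs : PySem.Set (Int × Int)) (hatches : List (Int × Int)) :
    List Int → Option (Int × Int)
  | [] => none
  | y :: ys =>
    if PySem.Set.contains hs (x, y) then yLoopA S x hs hatches ys
    else
      let r := min (min (min x y) (S - x)) (S - y)
      let r2 := r * r
      if innerA x y r2 hatches then some (x, y)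
      else yLoopA S x hs hatches ys

def xLoopA (S : Int) (hs : PySem.Set (Int × Int)) (hatches : List (Int × Int)) :
    List Int → Option (Int × Int)
  | [] => none
  | x :: xs =>
    match yLoopA S x hs hatches (PySem.List.pyRange 0 (S + 1) 1) with
    | some p => some p
    | none => xLoopA S hs hatches xs

def solve (S : Int) (H : Int) (hatches : List (Int × Int)) : Option (Int × Int) :=
  xLoopA S (PySem.Set.ofList hatches) hatches (PySem.List.pyRange 0 (S + 1) 1)

-- ===== PORT B =====
-- the hull stack is kept with its TOP at the HEAD (Source B pushes/pops at the END of the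
-- python list; only the kept set of lines and their running max are used, so the value
-- computed is the same)
def popB (m b : Int) : List (Int × Int) → List (Int × Int)
  | (m2, b2) :: (m1, b1) :: rest =>
    if (b1 - b2) * (m - m2) ≥ (b2 - b) * (m2 - m1) then popB m b ((m1, b1) :: rest)
    else (m2, b2) :: (m1, b1) :: rest
  | st => st

def buildHull (x : Int) (groups : List (Int × Int × Int)) : List (Int × Int) :=
  groups.foldl
    (fun hull g =>
      let m := -2 * g.1
      let b := g.1 * g.1 + max ((x - g.2.1) * (x - g.2.1)) ((x - g.2.2) * (x - g.2.2))
      (m, b) :: popB m b hull)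
    []

-- max(m * y + b for m, b in hull); hull is nonempty whenever it is queried
def hullMax (y : Int) : List (Int × Int) → Int
  | [] => 0
  | p :: t => t.foldl (fun acc q => max acc (q.1 * y + q.2)) (p.1 * y + p.2)

-- min(hx for hx, h2 in hatches if h2 == hy); only called with hy a present value
def minHx (hatches : List (Int × Int)) (hy : Int) : Int :=
  match (hatches.filter (fun h => h.2 == hy)).map (fun h => h.1) with
  | [] => 0
  | a :: t => t.foldl min a

def maxHx (hatches : List (Int × Int)) (hy : Int) : Int :=
  match (hatches.filter (fun h => h.2 == hy)).map (fun h => h.1) with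
  | [] => 0
  | a :: t => t.foldl max a

def yLoopB (S x : Int) (hs : PySem.Set (Int × Int)) (hull : List (Int × Int)) :
    List Int → Option (Int × Int)
  | [] => none
  | y :: ys =>
    if PySem.Set.contains hs (x, y) then yLoopB S x hs hull ys
    else
      let r := min (min (min x y) (S - x)) (S - y)
      if y * y + hullMax y hull ≤ r * r then some (x, y)
      else yLoopB S x hs hull ys

def xLoopB (S : Int) (hs : PySem.Set (Int × Int)) (groups : List (Int × Int × Int)) :
    List Int → Option (Int × Int)
  | [] => none
  | x :: xs =>
    match yLoopB S x hs (buildHull x groups) (PySem.List.pyRange 0 (S + 1) 1) with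
    | some p => some p
    | none => xLoopB S hs groups xs

def solve_alt (S : Int) (H : Int) (hatches : List (Int × Int)) : Option (Int × Int) :=
  if S < 0 then none
  else
    match hatches with
    | [] => some (0, 0)
    | _ :: _ =>
      let ysDesc := PySem.List.sorted (PySem.Set.ofList (hatches.map (fun h => h.2)))
        (fun z => z) true
      let groups := ysDesc.map (fun hy => (hy, minHx hatches hy, maxHx hatches hy))
      xLoopB S (PySem.Set.ofList hatches) groups (PySem.List.pyRange 0 (S + 1) 1)

-- ===== PRECONDITION & SPEC =====
def Spec_solve (S : Int) (H : Int) (hatches : List (Int × Int)) (out : Option (Int × Int)) : Prop := out = solve_alt S H hatches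
instance (S : Int) (H : Int) (hatches : List (Int × Int)) (out : Option (Int × Int)) : Decidable (Spec_solve S H hatches out) := by unfold Spec_solve; infer_instance

-- ===== CLAIM (what is proved, stated in full; the proofs are below) =====
def Claim_equal_solve : Prop := ∀ (S : Int) (H : Int) (hatches : List (Int × Int)), Dom_solve S H hatches → Spec_solve S H hatches (solve S H hatches)

-- ===== LEMMAS AND PROOFS =====

-- value of the line of hatch h at row x, column y (d2 = y*y + lineVal)
def lineVal (x : Int) (h : Int × Int) (y : Int) : Int :=
  -2 * h.2 * y + (h.2 * h.2 + (x - h.1) * (x - h.1))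

-- value of the line of a group triple (hy, lo, hi)
def grpVal (x : Int) (g : Int × Int × Int) (y : Int) : Int :=
  -2 * g.1 * y + (g.1 * g.1 + max ((x - g.2.1) * (x - g.2.1)) ((x - g.2.2) * (x - g.2.2)))

-- running max of line values anchored at a
def fMax (y a : Int) (l : List (Int × Int)) : Int :=
  l.foldl (fun acc q => max acc (q.1 * y + q.2)) a

theorem sq_le_max (x a b t : Int) (h1 : a ≤ t) (h2 : t ≤ b) :
    (x - t) * (x - t) ≤ max ((x - a) * (x - a)) ((x - b) * (x - b)) := by
  rcases le_total t x with h | h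
  · exact le_max_of_le_left (by nlinarith)
  · exact le_max_of_le_right (by nlinarith)

theorem innerA_eq_all (x y r2 : Int) (l : List (Int × Int)) :
    innerA x y r2 l =
      l.all (fun h => decide ((x - h.1) * (x - h.1) + (y - h.2) * (y - h.2) ≤ r2)) := by
  induction l with
  | nil => rfl
  | cons h t ih =>
    by_cases hd : (x - h.1) * (x - h.1) + (y - h.2) * (y - h.2) > r2
    · simp [innerA, hd, List.all_cons, not_le.mpr hd]
    · simp [innerA, hd, List.all_cons, not_lt.mp hd, ih]

-- the popped middle line is dominated by its two neighbours everywhere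
theorem pop_dominated (m1 m2 m3 b1 b2 b3 y : Int) (h12 : m1 < m2) (h23 : m2 < m3)
    (hc : (b1 - b2) * (m3 - m2) ≥ (b2 - b3) * (m2 - m1)) :
    m2 * y + b2 ≤ max (m1 * y + b1) (m3 * y + b3) := by
  by_contra h
  push_neg at h
  have ha : m1 * y + b1 < m2 * y + b2 := lt_of_le_of_lt (le_max_left _ _) h
  have hb : m3 * y + b3 < m2 * y + b2 := lt_of_le_of_lt (le_max_right _ _) h
  nlinarith [mul_lt_mul_of_pos_left (sub_lt_sub_right ha (m1 * y)) (sub_pos.mpr h23),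
             mul_lt_mul_of_pos_left (sub_lt_sub_right hb (m3 * y)) (sub_pos.mpr h12)]

theorem fMax_pull (y a b : Int) (l : List (Int × Int)) :
    fMax y (max a b) l = max a (fMax y b l) := by
  induction l generalizing b with
  | nil => rfl
  | cons q t ih =>
    show fMax y (max (max a b) (q.1 * y + q.2)) t = max a (fMax y (max b (q.1 * y + q.2)) t)
    rw [max_assoc, ih]

theorem popB_suffix (m b : Int) (st : List (Int × Int)) : (popB m b st).IsSuffix st := by
  induction st with
  | nil => exact List.suffix_rfl
  | cons p t ih =>
    cases t with
    | nil => exact List.suffix_rfl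
    | cons q r =>
      obtain ⟨m2, b2⟩ := p
      obtain ⟨m1, b1⟩ := q
      by_cases hc : (b1 - b2) * (m - m2) ≥ (b2 - b) * (m2 - m1)
      · rw [popB, if_pos hc]
        exact ih.trans (List.suffix_cons _ _)
      · rw [popB, if_neg hc]

theorem popB_fMax (m b y a : Int) (st : List (Int × Int))
    (hOK : st.Pairwise (fun p q => q.1 < p.1)) (hm : ∀ p ∈ st, p.1 < m) :
    fMax y (max a (m * y + b)) (popB m b st) = fMax y (max a (m * y + b)) st := by
  induction st with
  | nil => rfl
  | cons p t ih =>
    cases t with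
    | nil => rfl
    | cons q r =>
      obtain ⟨m2, b2⟩ := p
      obtain ⟨m1, b1⟩ := q
      by_cases hc : (b1 - b2) * (m - m2) ≥ (b2 - b) * (m2 - m1)
      · rw [popB, if_pos hc]
        rw [ih (List.pairwise_cons.mp hOK).2
            (fun p hp => hm p (List.mem_cons_of_mem _ hp))]
        show fMax y (max (max a (m * y + b)) (m1 * y + b1)) r =
          fMax y (max (max (max a (m * y + b)) (m2 * y + b2)) (m1 * y + b1)) r
        congr 1
        have h12 : m1 < m2 := (List.pairwise_cons.mp hOK).1 (m1, b1) (List.mem_cons_self)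
        have h2m : m2 < m := hm (m2, b2) (List.mem_cons_self)
        have hd := pop_dominated m1 m2 m b1 b2 b y h12 h2m hc
        have hv2 : m2 * y + b2 ≤ max (max a (m * y + b)) (m1 * y + b1) := by
          refine hd.trans (max_le ?_ ?_)
          · exact le_max_right _ _
          · exact le_max_of_le_left (le_max_right _ _)
        rw [max_right_comm (max a (m * y + b)) (m2 * y + b2) (m1 * y + b1),
          max_eq_left hv2]
      · rw [popB, if_neg hc]

theorem buildFold_ne_nil (x : Int) (g : Int × Int × Int) (gs : List (Int × Int × Int))
    (st : List (Int × Int)) :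
    (g :: gs).foldl
      (fun hull g =>
        let m := -2 * g.1
        let b := g.1 * g.1 + max ((x - g.2.1) * (x - g.2.1)) ((x - g.2.2) * (x - g.2.2))
        (m, b) :: popB m b hull) st ≠ [] := by
  induction gs generalizing g st with
  | nil => exact List.cons_ne_nil _ _
  | cons g' gs' ih => exact ih g' _

theorem build_go (x y : Int) (gs : List (Int × Int × Int)) :
    ∀ (st : List (Int × Int)) (a : Int),
    st.Pairwise (fun p q => q.1 < p.1) →
    (∀ g ∈ gs, ∀ p ∈ st, p.1 < -2 * g.1) →
    gs.Pairwise (fun g g' => -2 * g.1 < -2 * g'.1) →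
    fMax y a (gs.foldl
      (fun hull g =>
        let m := -2 * g.1
        let b := g.1 * g.1 + max ((x - g.2.1) * (x - g.2.1)) ((x - g.2.2) * (x - g.2.2))
        (m, b) :: popB m b hull) st) =
    gs.foldl (fun acc g => max acc (grpVal x g y)) (fMax y a st) := by
  induction gs with
  | nil => intro st a _ _ _; rfl
  | cons g gs ih =>
    intro st a hOK hgt hinc
    have hmemsub : ∀ p ∈ popB (-2 * g.1)
        (g.1 * g.1 + max ((x - g.2.1) * (x - g.2.1)) ((x - g.2.2) * (x - g.2.2))) st,
        p ∈ st := fun p hp => (popB_suffix _ _ st).sublist.mem hp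
    have hOK' : ((-2 * g.1,
        g.1 * g.1 + max ((x - g.2.1) * (x - g.2.1)) ((x - g.2.2) * (x - g.2.2))) ::
        popB (-2 * g.1)
          (g.1 * g.1 + max ((x - g.2.1) * (x - g.2.1)) ((x - g.2.2) * (x - g.2.2))) st
        ).Pairwise (fun p q => q.1 < p.1) := by
      refine List.pairwise_cons.mpr ⟨?_, ?_⟩
      · exact fun p hp => hgt g (List.mem_cons_self) p (hmemsub p hp)
      · exact List.Pairwise.sublist (popB_suffix _ _ st).sublist hOK
    have hgt' : ∀ g' ∈ gs, ∀ p ∈ ((-2 * g.1,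
        g.1 * g.1 + max ((x - g.2.1) * (x - g.2.1)) ((x - g.2.2) * (x - g.2.2))) ::
        popB (-2 * g.1)
          (g.1 * g.1 + max ((x - g.2.1) * (x - g.2.1)) ((x - g.2.2) * (x - g.2.2))) st),
        p.1 < -2 * g'.1 := by
      intro g' hg' p hp
      rcases List.mem_cons.mp hp with rfl | hp'
      · exact (List.pairwise_cons.mp hinc).1 g' hg'
      · exact hgt g' (List.mem_cons_of_mem _ hg') p (hmemsub p hp')
    have hrec := ih ((-2 * g.1,
        g.1 * g.1 + max ((x - g.2.1) * (x - g.2.1)) ((x - g.2.2) * (x - g.2.2))) ::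
        popB (-2 * g.1)
          (g.1 * g.1 + max ((x - g.2.1) * (x - g.2.1)) ((x - g.2.2) * (x - g.2.2))) st)
      a hOK' hgt' (List.pairwise_cons.mp hinc).2
    rw [List.foldl_cons, List.foldl_cons]
    refine hrec.trans ?_
    congr 1
    show fMax y (max a (-2 * g.1 * y +
        (g.1 * g.1 + max ((x - g.2.1) * (x - g.2.1)) ((x - g.2.2) * (x - g.2.2)))))
        (popB (-2 * g.1)
          (g.1 * g.1 + max ((x - g.2.1) * (x - g.2.1)) ((x - g.2.2) * (x - g.2.2))) st) =
      max (fMax y a st) (grpVal x g y)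
    rw [popB_fMax _ _ _ _ _ hOK (fun p hp => hgt g (List.mem_cons_self) p hp)]
    rw [max_comm a, fMax_pull]
    rw [max_comm]
    rfl

theorem fMax_cons_eq (y a : Int) (p : Int × Int) (t : List (Int × Int)) :
    fMax y a (p :: t) = max a (hullMax y (p :: t)) := by
  show fMax y (max a (p.1 * y + p.2)) t = max a (hullMax y (p :: t))
  rw [fMax_pull]; rfl

theorem foldl_maxf_le {alpha : Type} (f : alpha → Int) (l : List alpha) : ∀ (c a : Int),
    a ≤ c → (∀ g ∈ l, f g ≤ c) → l.foldl (fun acc g => max acc (f g)) a ≤ c := by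
  induction l with
  | nil => intro c a ha _; exact ha
  | cons g t ih =>
    intro c a ha h
    exact ih c (max a (f g)) (max_le ha (h g List.mem_cons_self))
      (fun g' hg' => h g' (List.mem_cons_of_mem _ hg'))

theorem hullMax_le_iff (x y t : Int) (g0 : Int × Int × Int) (gs : List (Int × Int × Int))
    (hinc : (g0 :: gs).Pairwise (fun g g' => -2 * g.1 < -2 * g'.1)) :
    (hullMax y (buildHull x (g0 :: gs)) ≤ t ↔ ∀ g ∈ g0 :: gs, grpVal x g y ≤ t) := by
  have hEQ : ∀ a : Int, max a (hullMax y (buildHull x (g0 :: gs))) =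
      (g0 :: gs).foldl (fun acc g => max acc (grpVal x g y)) a := by
    intro a
    have h1 := build_go x y (g0 :: gs) [] a (List.Pairwise.nil) (by intro g _ p hp; cases hp)
      hinc
    have hne := buildFold_ne_nil x g0 gs []
    unfold buildHull
    cases hh : (g0 :: gs).foldl
      (fun hull g =>
        let m := -2 * g.1
        let b := g.1 * g.1 + max ((x - g.2.1) * (x - g.2.1)) ((x - g.2.2) * (x - g.2.2))
        (m, b) :: popB m b hull) [] with
    | nil => exact absurd hh hne
    | cons p tl =>
      have := h1
      rw [hh] at this
      rw [← fMax_cons_eq]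
      exact this
  constructor
  · intro hM g hg
    have h2 := PySem.List.le_foldl_max_int (g0 :: gs) (fun g => grpVal x g y)
      (hullMax y (buildHull x (g0 :: gs)))
    have h3 := h2.2 g hg
    rw [← hEQ (hullMax y (buildHull x (g0 :: gs)))] at h3
    simpa using h3.trans (by simpa using hM)
  · intro hall
    have h4 : (g0 :: gs).foldl (fun acc g => max acc (grpVal x g y)) t ≤ t :=
      foldl_maxf_le _ _ t t le_rfl hall
    rw [← hEQ t] at h4
    exact (le_max_right t _).trans h4

-- the group list built by Source B from a hatch list
def groupsOf (hatches : List (Int × Int)) : List (Int × Int × Int) :=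
  (PySem.List.sorted (PySem.Set.ofList (hatches.map (fun h => h.2))) (fun z => z) true).map
    (fun hy => (hy, minHx hatches hy, maxHx hatches hy))

theorem d2_eq (x y : Int) (h : Int × Int) :
    (x - h.1) * (x - h.1) + (y - h.2) * (y - h.2) = y * y + lineVal x h y := by
  unfold lineVal; ring

theorem groups_inc (hatches : List (Int × Int)) :
    (groupsOf hatches).Pairwise (fun g g' => -2 * g.1 < -2 * g'.1) := by
  unfold groupsOf
  rw [List.pairwise_map]
  have hle := PySem.List.sorted_pairwise_rev (xs := PySem.Set.ofList (hatches.map (fun h => h.2)))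
    (key := fun z => z)
  have hperm := PySem.List.sorted_perm (PySem.Set.ofList (hatches.map (fun h => h.2)))
    (fun z => z) true
  have hnd := hperm.symm.nodup (PySem.Set.nodup_ofList _)
  refine (hle.and hnd).imp ?_
  intro a b hab
  show -2 * a < -2 * b
  obtain ⟨hle', hne⟩ := hab
  omega

theorem minHx_le (hatches : List (Int × Int)) (h : Int × Int) (hm : h ∈ hatches) :
    minHx hatches h.2 ≤ h.1 ∧ h.1 ≤ maxHx hatches h.2 := by
  have hmem : h.1 ∈ (hatches.filter (fun p => p.2 == h.2)).map (fun p => p.1) :=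
    List.mem_map.mpr ⟨h, List.mem_filter.mpr ⟨hm, by simp⟩, rfl⟩
  unfold minHx maxHx
  cases hl : (hatches.filter (fun p => p.2 == h.2)).map (fun p => p.1) with
  | nil => rw [hl] at hmem; cases hmem
  | cons a tl =>
    rw [hl] at hmem
    have hmin := PySem.List.foldl_min_le tl a
    have hmax := PySem.List.le_foldl_max tl a
    rcases List.mem_cons.mp hmem with rfl | hmem'
    · exact ⟨hmin.1, hmax.1⟩
    · exact ⟨hmin.2 _ hmem', hmax.2 _ hmem'⟩

theorem extreme_attained (hatches : List (Int × Int)) (hy : Int)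
    (hne : ∃ h ∈ hatches, h.2 = hy) :
    ((minHx hatches hy, hy) ∈ hatches) ∧ ((maxHx hatches hy, hy) ∈ hatches) := by
  obtain ⟨h, hm, hhy⟩ := hne
  have hmem : h.1 ∈ (hatches.filter (fun p => p.2 == hy)).map (fun p => p.1) :=
    List.mem_map.mpr ⟨h, List.mem_filter.mpr ⟨hm, by simp [hhy]⟩, rfl⟩
  have key : ∀ v, v ∈ (hatches.filter (fun p => p.2 == hy)).map (fun p => p.1) →
      (v, hy) ∈ hatches := by
    intro v hv
    obtain ⟨p, hp, hpv⟩ := List.mem_map.mp hv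
    have hpf := List.mem_filter.mp hp
    have h2 : p.2 = hy := by simpa using hpf.2
    have hpe : p = (v, hy) := by cases p; simp_all
    rw [← hpe]; exact hpf.1
  cases hl : (hatches.filter (fun p => p.2 == hy)).map (fun p => p.1) with
  | nil => rw [hl] at hmem; cases hmem
  | cons a tl =>
    constructor
    · have he : minHx hatches hy = List.foldl min a tl := by unfold minHx; rw [hl]
      rw [he]
      rcases PySem.List.foldl_min_mem tl a with hf | hf
      · exact key _ (by rw [hl, hf]; exact List.mem_cons_self)
      · exact key _ (by rw [hl]; exact List.mem_cons_of_mem _ hf)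
    · have he : maxHx hatches hy = List.foldl max a tl := by unfold maxHx; rw [hl]
      rw [he]
      rcases PySem.List.foldl_max_mem tl a with hf | hf
      · exact key _ (by rw [hl, hf]; exact List.mem_cons_self)
      · exact key _ (by rw [hl]; exact List.mem_cons_of_mem _ hf)

theorem lines_le_iff (x y t : Int) (hatches : List (Int × Int)) :
    (∀ g ∈ groupsOf hatches, grpVal x g y ≤ t) ↔
      (∀ h ∈ hatches, lineVal x h y ≤ t) := by
  constructor
  · intro hg h hm
    have hy_mem : h.2 ∈ PySem.List.sorted (PySem.Set.ofList (hatches.map (fun p => p.2)))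
        (fun z => z) true := by
      rw [PySem.List.mem_sorted, PySem.Set.mem_ofList]
      exact List.mem_map.mpr ⟨h, hm, rfl⟩
    have hgmem : (h.2, minHx hatches h.2, maxHx hatches h.2) ∈ groupsOf hatches :=
      List.mem_map.mpr ⟨h.2, hy_mem, rfl⟩
    have hb := minHx_le hatches h hm
    have hgv := hg _ hgmem
    unfold grpVal at hgv
    unfold lineVal
    have hsq := sq_le_max x (minHx hatches h.2) (maxHx hatches h.2) h.1 hb.1 hb.2
    simp only at hgv
    omega
  · intro hh g hg
    unfold groupsOf at hg
    obtain ⟨hy, hysm, rfl⟩ := List.mem_map.mp hg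
    have hy_ex : ∃ h ∈ hatches, h.2 = hy := by
      rw [PySem.List.mem_sorted, PySem.Set.mem_ofList] at hysm
      obtain ⟨h, hm, he⟩ := List.mem_map.mp hysm
      exact ⟨h, hm, he⟩
    obtain ⟨hlo, hhi⟩ := extreme_attained hatches hy hy_ex
    have h1 := hh _ hlo
    have h2 := hh _ hhi
    unfold lineVal at h1 h2
    unfold grpVal
    simp only at h1 h2 ⊢
    rcases max_cases ((x - minHx hatches hy) * (x - minHx hatches hy))
      ((x - maxHx hatches hy) * (x - maxHx hatches hy)) with ⟨heq, _⟩ | ⟨heq, _⟩ <;>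
      rw [heq] <;> omega

theorem cond_eq (S x y r2 : Int) (h0 : Int × Int) (t : List (Int × Int)) :
    innerA x y r2 (h0 :: t) =
      decide (y * y + hullMax y (buildHull x (groupsOf (h0 :: t))) ≤ r2) := by
  have hne : groupsOf (h0 :: t) ≠ [] := by
    intro hcon
    have : h0.2 ∈ PySem.List.sorted (PySem.Set.ofList ((h0 :: t).map (fun p => p.2)))
        (fun z => z) true := by
      rw [PySem.List.mem_sorted, PySem.Set.mem_ofList]
      exact List.mem_map.mpr ⟨h0, List.mem_cons_self, rfl⟩
    unfold groupsOf at hcon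
    rw [List.map_eq_nil_iff] at hcon
    rw [hcon] at this
    cases this
  cases hgl : groupsOf (h0 :: t) with
  | nil => exact absurd hgl hne
  | cons g0 gs =>
    have hinc := groups_inc (h0 :: t)
    rw [hgl] at hinc
    have hiff := hullMax_le_iff x y (r2 - y * y) g0 gs hinc
    have hlines := lines_le_iff x y (r2 - y * y) (h0 :: t)
    rw [innerA_eq_all]
    rw [Bool.eq_iff_iff]
    rw [List.all_eq_true, decide_eq_true_eq]
    constructor
    · intro hall
      have hli : ∀ h ∈ h0 :: t, lineVal x h y ≤ r2 - y * y := by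
        intro h hm
        have hdec := of_decide_eq_true (hall h hm)
        have hd := d2_eq x y h
        omega
      have h3 := hlines.mpr hli
      rw [hgl] at h3
      have h4 := hiff.mpr h3
      omega
    · intro hle h hm
      have h5 := hiff.mp (by omega)
      rw [← hgl] at h5
      have := (hlines.mp h5) h hm
      have hd := d2_eq x y h
      exact decide_eq_true (by omega)

theorem yLoop_eq (S x : Int) (hs : PySem.Set (Int × Int)) (h0 : Int × Int)
    (t : List (Int × Int)) (ys : List Int) :
    yLoopA S x hs (h0 :: t) ys = yLoopB S x hs (buildHull x (groupsOf (h0 :: t))) ys := by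
  induction ys with
  | nil => rfl
  | cons y ys ih =>
    show (if PySem.Set.contains hs (x, y) = true then yLoopA S x hs (h0 :: t) ys
      else
        if innerA x y ((min (min (min x y) (S - x)) (S - y)) *
            (min (min (min x y) (S - x)) (S - y))) (h0 :: t) = true then some (x, y)
        else yLoopA S x hs (h0 :: t) ys) = _
    rw [cond_eq S x y _ h0 t, ih]
    simp only [decide_eq_true_eq]
    rfl

theorem xLoop_eq (S : Int) (hs : PySem.Set (Int × Int)) (h0 : Int × Int)
    (t : List (Int × Int)) (xs : List Int) :
    xLoopA S hs (h0 :: t) xs = xLoopB S hs (groupsOf (h0 :: t)) xs := by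
  induction xs with
  | nil => rfl
  | cons x xs ih =>
    simp only [xLoopA, xLoopB, yLoop_eq S x hs h0 t, ih]

theorem solve_empty (S H : Int) : solve S H [] = if S < 0 then none else some (0, 0) := by
  by_cases hS : S < 0
  · have : PySem.List.pyRange 0 (S + 1) 1 = [] := PySem.List.pyRange_one_eq_nil (by omega)
    simp [solve, this, xLoopA, hS]
  · have h0 : PySem.List.pyRange 0 (S + 1) 1 = 0 :: PySem.List.pyRange 1 (S + 1) 1 :=
      PySem.List.pyRange_one_cons (by omega)
    simp only [solve, h0, xLoopA, yLoopA]
    have hc : PySem.Set.contains (PySem.Set.ofList ([] : List (Int × Int)))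
        ((0 : Int), (0 : Int)) = false := rfl
    simp [innerA, hS]

-- ===== VERDICT (by name: the statement is the Claim_ definition above) =====
theorem solve_spec : Claim_equal_solve := by
  intro S H hatches _
  unfold Spec_solve
  match hatches with
  | [] => simp [solve_empty, solve_alt]
  | h0 :: t =>
    by_cases hS : S < 0
    · have : PySem.List.pyRange 0 (S + 1) 1 = [] := PySem.List.pyRange_one_eq_nil (by omega)
      simp [solve, solve_alt, this, xLoopA, hS]
    · simp only [solve, solve_alt, hS, if_false]
      exact xLoop_eq S _ h0 t _
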